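-- pv_equiv track=rewrite | github.com/JackBro/FuzzLabs | engine2/primitives/transforms/synchsafe.py | transform
-- ===== SOURCE A (Python) =====
-- def transform(integer):
--     out = mask = 0x7F
--     while (mask ^ 0x7FFFFFFF):
--         out = integer & ~mask
--         out <<= 1
--         out |= integer & mask
--         mask = ((mask + 1) << 8) - 1
--         integer = out
--     return out
-- ===== SOURCE B (Python) =====
-- def transform(integer):
--     q, r0 = divmod(integer, 128)
--     q, r1 = divmod(q, 128)
--     q, r2 = divmod(q, 128)
--     return r0 + r1 * 256 + r2 * 65536 + q * 16777216
-- ===== Notes on version B (the rewrite author's own statement) =====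
-- stated objective: simpler
-- what changed: Replaces A's three-iteration mask-evolving bitwise loop (and/not/shift/or with a growing mask) by a loopless closed form: three successive divmods extract the seven-bit groups, which are reassembled at byte positions by plain arithmetic.
import Mathlib
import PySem

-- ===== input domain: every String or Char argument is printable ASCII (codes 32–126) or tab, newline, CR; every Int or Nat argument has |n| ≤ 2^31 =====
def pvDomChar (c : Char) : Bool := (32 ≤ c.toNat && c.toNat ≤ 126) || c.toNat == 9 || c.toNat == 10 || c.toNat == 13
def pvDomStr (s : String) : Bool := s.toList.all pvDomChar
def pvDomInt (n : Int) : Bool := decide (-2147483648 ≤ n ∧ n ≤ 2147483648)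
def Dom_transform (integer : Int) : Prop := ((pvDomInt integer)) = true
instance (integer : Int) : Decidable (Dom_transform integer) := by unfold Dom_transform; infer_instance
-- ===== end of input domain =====

-- B replaces A's three-iteration mask-evolving bitwise loop by a loopless closed form:
-- three divmods by 128 extract the 7-bit groups, reassembled at byte positions by arithmetic.

-- ===== PORT A =====
-- the while loop of A as fuel recursion (fuel only makes the recursion total; the loop
-- runs exactly 3 iterations, fuel 4 suffices and the exit condition is still checked)
def transformLoop : Nat → Int → Int → Int → Int
  | 0, _, out, _ => out
  | fuel+1, integer, out, mask =>
    if PySem.Int.bxor mask 0x7FFFFFFF ≠ 0 then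
      let out := PySem.Int.band integer (Int.not mask)
      let out := out <<< (1 : Nat)
      let out := PySem.Int.bor out (PySem.Int.band integer mask)
      transformLoop fuel out out (((mask + 1) <<< (8 : Nat)) - 1)
    else out

def transform (integer : Int) : Int := transformLoop 4 integer 0x7F 0x7F

-- ===== PORT B =====
def transform_alt (integer : Int) : Int :=
  let q := PySem.Int.floordiv integer 128
  let r0 := PySem.Int.mod integer 128
  let q' := PySem.Int.floordiv q 128
  let r1 := PySem.Int.mod q 128
  let q'' := PySem.Int.floordiv q' 128
  let r2 := PySem.Int.mod q' 128
  r0 + r1 * 256 + r2 * 65536 + q'' * 16777216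

-- ===== PRECONDITION & SPEC =====
def Spec_transform (integer : Int) (out : Int) : Prop := out = transform_alt integer
instance (integer : Int) (out : Int) : Decidable (Spec_transform integer out) := by unfold Spec_transform; infer_instance

-- ===== CLAIM (what is proved, stated in full; the proofs are below) =====
def Claim_equal_transform : Prop := ∀ (integer : Int), Dom_transform integer → Spec_transform integer (transform integer)

-- ===== LEMMAS AND PROOFS =====

-- Nat: appending low bits below a shifted value is addition
theorem natOrAppend : ∀ (m c b : Nat), b < 2 ^ m → c * 2 ^ m ||| b = c * 2 ^ m + b := by
  intro m
  induction m with
  | zero => intro c b hb; interval_cases b; simp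
  | succ m ih =>
    intro c b hb
    have hp : 2 ^ (m + 1) = 2 * 2 ^ m := by ring
    have hb2 : b / 2 < 2 ^ m := by omega
    have e1 : c * 2 ^ (m + 1) = Nat.bit false (c * 2 ^ m) := by
      rw [Nat.bit_val]; simp; ring
    have e2 : Nat.bit (decide (b % 2 = 1)) (b / 2) = b := by
      rw [Nat.bit_val]
      rcases Nat.mod_two_eq_zero_or_one b with h | h <;> (simp [h]; omega)
    rw [e1, ← e2, Nat.lor_bit, ih _ _ hb2, Bool.false_or, Nat.bit_val, Nat.bit_val]
    rcases Nat.mod_two_eq_zero_or_one b with h | h <;> (simp [h]; omega)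

-- Nat: or with a full low mask sets all low bits
theorem natOrMask : ∀ (k n : Nat), n ||| (2 ^ k - 1) = (n / 2 ^ k) * 2 ^ k + (2 ^ k - 1) := by
  intro k
  induction k with
  | zero => intro n; simp
  | succ k ih =>
    intro n
    have hp : 2 ^ (k + 1) = 2 * 2 ^ k := by ring
    have h1 : 1 ≤ 2 ^ k := Nat.one_le_two_pow
    have e1 : (2 : Nat) ^ (k + 1) - 1 = Nat.bit true (2 ^ k - 1) := by
      rw [Nat.bit_val]; simp; omega
    have e2 : Nat.bit (decide (n % 2 = 1)) (n / 2) = n := by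
      rw [Nat.bit_val]
      rcases Nat.mod_two_eq_zero_or_one n with h | h <;> (simp [h]; omega)
    have e3 : n / 2 / 2 ^ k = n / 2 ^ (k + 1) := by
      rw [Nat.div_div_eq_div_mul, hp, Nat.mul_comm]
    have lhs : n ||| (2 ^ (k + 1) - 1)
        = Nat.bit true ((n / 2 / 2 ^ k) * 2 ^ k + (2 ^ k - 1)) := by
      conv_lhs => rw [e1, ← e2]
      rw [Nat.lor_bit, ih, Bool.or_true]
    rw [lhs, Nat.bit_val, e3]
    have e4 : n / 2 ^ (k + 1) * 2 ^ (k + 1) = 2 * (n / 2 ^ (k + 1) * 2 ^ k) := by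
      rw [hp]; ring
    simp only [Bool.toNat_true]
    omega

-- Nat: and with a value whose low m bits are all set keeps any value below 2^m
theorem natAndLow (m N r : Nat) (hr : r < 2 ^ m) (hN : N % 2 ^ m = 2 ^ m - 1) :
    N &&& r = r := by
  apply Nat.eq_of_testBit_eq
  intro j
  rw [Nat.testBit_and]
  by_cases hj : j < m
  · have h := Nat.testBit_mod_two_pow N m j
    rw [hN, Nat.testBit_two_pow_sub_one] at h
    simp [hj] at h
    rw [h, Bool.true_and]
  · have hrj : r.testBit j = false := by
      apply Nat.testBit_lt_two_pow
      calc r < 2 ^ m := hr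
        _ ≤ 2 ^ j := Nat.pow_le_pow_right (by norm_num) (by omega)
    simp [hrj]

theorem intNotEq (a : Int) : Int.not a = -a - 1 := by
  cases a with
  | ofNat n => simp [Int.not, Int.negSucc_eq]; ring
  | negSucc n => simp [Int.not, Int.negSucc_eq]

-- emod of a nonnegative integer, variable Nat modulus
theorem intNatEmod (P n : Nat) : (n : Int) % (P : Int) = ((n % P : Nat) : Int) := by
  push_cast; ring

-- emod of a negative integer written as -1 - n, variable positive Nat modulus
theorem intNegEmod (P n : Nat) (hP : 1 ≤ P) :
    (-1 - (n : Int)) % (P : Int) = ((P - 1 - n % P : Nat) : Int) := by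
  have hr : n % P < P := Nat.mod_lt _ (by omega)
  have hdm : P * (n / P) + n % P = n := Nat.div_add_mod n P
  have hrew : (-1 - (n : Int))
      = ((P - 1 - n % P : Nat) : Int) + (P : Int) * (-(1 + (n / P : Nat))) := by
    have hn : (n : Int) = (P : Int) * (n / P : Nat) + (n % P : Nat) := by
      exact_mod_cast congrArg (Nat.cast (R := Int)) hdm.symm
    have hsub : ((P - 1 - n % P : Nat) : Int) = (P : Int) - 1 - (n % P : Nat) := by omega
    rw [hsub, hn]; ring
  rw [hrew, Int.add_mul_emod_self_left, Int.emod_eq_of_lt (by positivity) (by omega)]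

-- Int: band with mask 2^k - 1 is emod 2^k
theorem intBandMask (k : Nat) (i : Int) :
    PySem.Int.band i ((2 : Int) ^ k - 1) = i % (2 : Int) ^ k := by
  have h1 : (1 : Nat) ≤ 2 ^ k := Nat.one_le_two_pow
  have hmInt : ((2 : Int) ^ k - 1) = ((2 ^ k - 1 : Nat) : Int) := by
    rw [Nat.cast_sub h1]; push_cast; ring
  have hcast : ((2 ^ k : Nat) : Int) = (2 : Int) ^ k := by push_cast; ring
  unfold PySem.Int.band
  by_cases hi : 0 ≤ i
  · rw [if_pos hi, if_pos (by rw [hmInt]; positivity)]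
    obtain ⟨n, rfl⟩ := Int.eq_ofNat_of_zero_le hi
    rw [hmInt, Int.toNat_natCast, Int.toNat_natCast, Nat.and_two_pow_sub_one_eq_mod,
      ← hcast, intNatEmod]
  · rw [if_neg hi, if_pos (by rw [hmInt]; positivity)]
    set n := (-i - 1).toNat with hn
    have hi2 : i = -1 - (n : Int) := by omega
    rw [hmInt, Int.toNat_natCast, Nat.and_comm, Nat.and_two_pow_sub_one_eq_mod,
      hi2, ← hcast, intNegEmod _ _ h1]

-- Int: band with the complement of mask 2^k - 1 clears the low k bits
theorem intBandNot (k : Nat) (i : Int) :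
    PySem.Int.band i (Int.not ((2 : Int) ^ k - 1)) = i - i % (2 : Int) ^ k := by
  have h1 : (1 : Nat) ≤ 2 ^ k := Nat.one_le_two_pow
  have hmInt : ((2 : Int) ^ k - 1) = ((2 ^ k - 1 : Nat) : Int) := by
    rw [Nat.cast_sub h1]; push_cast; ring
  have hcast : ((2 ^ k : Nat) : Int) = (2 : Int) ^ k := by push_cast; ring
  have hnot : Int.not ((2 : Int) ^ k - 1) = -((2 : Int) ^ k) := by rw [intNotEq]; ring
  have hpos : (0 : Int) < (2 : Int) ^ k := by positivity
  rw [hnot]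
  unfold PySem.Int.band
  by_cases hi : 0 ≤ i
  · rw [if_pos hi, if_neg (by omega)]
    obtain ⟨n, rfl⟩ := Int.eq_ofNat_of_zero_le hi
    have he : (-(-(2 : Int) ^ k) - 1) = ((2 ^ k - 1 : Nat) : Int) := by rw [← hmInt]; ring
    rw [he, Int.toNat_natCast, Int.toNat_natCast, Nat.and_two_pow_sub_one_eq_mod,
      ← hcast, intNatEmod]
    have hle : n % 2 ^ k ≤ n := Nat.mod_le n _
    omega
  · rw [if_neg hi, if_neg (by omega)]
    set n := (-i - 1).toNat with hn
    have hi2 : i = -1 - (n : Int) := by omega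
    have he : (-(-(2 : Int) ^ k) - 1) = ((2 ^ k - 1 : Nat) : Int) := by rw [← hmInt]; ring
    rw [he, Int.toNat_natCast, natOrMask, hi2, ← hcast, intNegEmod _ _ h1]
    have hdm : n / 2 ^ k * 2 ^ k + n % 2 ^ k = n := by
      rw [Nat.mul_comm]; exact Nat.div_add_mod n _
    have hr : n % 2 ^ k < 2 ^ k := Nat.mod_lt _ (by omega)
    generalize hXg : n / 2 ^ k * 2 ^ k = X at hdm ⊢
    omega

-- Int: bor of the shifted high part with the low part is addition
theorem intBorStep (k : Nat) (i : Int) :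
    PySem.Int.bor ((i - i % (2 : Int) ^ k) * 2) (i % (2 : Int) ^ k)
      = (i - i % (2 : Int) ^ k) * 2 + i % (2 : Int) ^ k := by
  have hpos : (0 : Int) < (2 : Int) ^ k := by positivity
  have hcast : ((2 ^ k : Nat) : Int) = (2 : Int) ^ k := by push_cast; ring
  have hcast1 : ((2 ^ (k + 1) : Nat) : Int) = 2 * (2 : Int) ^ k := by push_cast; ring
  set r := i % (2 : Int) ^ k with hrdef
  have hr0 : 0 ≤ r := Int.emod_nonneg i (by omega)
  have hrlt : r < (2 : Int) ^ k := Int.emod_lt_of_pos i hpos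
  have hediv : (2 : Int) ^ k * (i / (2 : Int) ^ k) + r = i := Int.ediv_add_emod i _
  set c := i / (2 : Int) ^ k with hcdef
  have hir : i - r = (2 : Int) ^ k * c := by linarith
  set r' := r.toNat with hr'
  have hrr : r = (r' : Int) := by omega
  have hr'lt : (r' : Int) < ((2 ^ (k + 1) : Nat) : Int) := by rw [hcast1]; omega
  have hr'lt' : r' < 2 ^ (k + 1) := by exact_mod_cast hr'lt
  by_cases hc : 0 ≤ c
  · obtain ⟨c', hcc⟩ := Int.eq_ofNat_of_zero_le hc
    have ha : (i - r) * 2 = ((c' * 2 ^ (k + 1) : Nat) : Int) := by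
      rw [hir, hcc]; push_cast; ring
    rw [ha, hrr]
    unfold PySem.Int.bor
    rw [if_pos (by positivity), if_pos (by positivity), Int.toNat_natCast, Int.toNat_natCast,
      natOrAppend _ _ _ hr'lt']
    push_cast; ring
  · obtain ⟨d, hdN⟩ : ∃ d : Nat, (d : Int) = -c := ⟨(-c).toNat, by omega⟩
    have hd1 : 1 ≤ d := by omega
    have hcd : c = -(d : Int) := by omega
    have hD : 1 ≤ d * 2 ^ (k + 1) := Nat.one_le_iff_ne_zero.mpr (by positivity)
    have ha : (i - r) * 2 = -((d * 2 ^ (k + 1) : Nat) : Int) := by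
      rw [hir, hcd]; push_cast; ring
    have haneg : ¬ 0 ≤ (i - r) * 2 := by
      rw [ha]
      have : (1 : Int) ≤ ((d * 2 ^ (k + 1) : Nat) : Int) := by exact_mod_cast hD
      omega
    rw [ha, hrr]
    unfold PySem.Int.bor
    rw [if_neg (by rw [← ha]; exact haneg), if_pos (by positivity)]
    have he : (-(-((d * 2 ^ (k + 1) : Nat) : Int)) - 1) = ((d * 2 ^ (k + 1) - 1 : Nat) : Int) := by
      omega
    rw [he, Int.toNat_natCast, Int.toNat_natCast]
    set N := d * 2 ^ (k + 1) - 1 with hN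
    have hNmod : N % 2 ^ (k + 1) = 2 ^ (k + 1) - 1 := by
      obtain ⟨t, ht⟩ : ∃ t, d = t + 1 := ⟨d - 1, by omega⟩
      have he2 : d * 2 ^ (k + 1) = t * 2 ^ (k + 1) + 2 ^ (k + 1) := by rw [ht]; ring
      have h1 : 1 ≤ 2 ^ (k + 1) := Nat.one_le_two_pow
      have he3 : N = (2 ^ (k + 1) - 1) + t * 2 ^ (k + 1) := by rw [hN]; omega
      rw [he3, Nat.add_mul_mod_self_right, Nat.mod_eq_of_lt (by omega)]
    have hDge : 2 ^ (k + 1) ≤ d * 2 ^ (k + 1) := Nat.le_mul_of_pos_left _ (by omega)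
    rw [natAndLow _ _ _ hr'lt' hNmod, hN]
    generalize hDg : d * 2 ^ (k + 1) = D at hDge ⊢
    omega

-- one iteration of A's loop, closed form
theorem stepEq (k : Nat) (i : Int) :
    PySem.Int.bor ((PySem.Int.band i (Int.not ((2 : Int) ^ k - 1))) <<< (1 : Nat))
        (PySem.Int.band i ((2 : Int) ^ k - 1))
      = 2 * i - i % (2 : Int) ^ k := by
  rw [intBandMask, intBandNot, Int.shiftLeft_eq]
  norm_num
  rw [intBorStep]
  ring

-- ===== VERDICT (by name: the statement is the Claim_ definition above) =====
theorem transform_spec : Claim_equal_transform := by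
  intro i _
  unfold Spec_transform transform transform_alt
  simp only [transformLoop, PySem.Int.mod, PySem.Int.floordiv]
  norm_num [Int.shiftLeft_eq, Int.fmod_eq_emod, Int.fdiv_eq_ediv,
    show PySem.Int.bxor 127 2147483647 = 2147483520 by decide,
    show PySem.Int.bxor 32767 2147483647 = 2147450880 by decide,
    show PySem.Int.bxor 8388607 2147483647 = 2139095040 by decide,
    show PySem.Int.bxor 2147483647 2147483647 = 0 by decide]
  have h7 := stepEq 7 i
  norm_num [Int.shiftLeft_eq] at h7
  rw [h7]
  have h15 := stepEq 15 (2 * i - i % 128)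
  norm_num [Int.shiftLeft_eq] at h15
  rw [h15]
  have h23 := stepEq 23 (2 * (2 * i - i % 128) - (2 * i - i % 128) % 32768)
  norm_num [Int.shiftLeft_eq] at h23
  rw [h23]
  omega
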